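-- pv_equiv track=rewrite | github.com/Rajatt-Chawla/ATS-Resume-Screening | backend/resume_generator.py | enhance_bullet_point
-- ===== SOURCE A (Python) =====
-- def enhance_bullet_point(text: str) -> str:
--     """
--     Enhance a bullet point with action verbs and quantification.
--
--     Args:
--         text: Original bullet point text
--
--     Returns:
--         Enhanced bullet point
--     """
--     # Common action verbs
--     action_verbs = [
--         'Developed', 'Implemented', 'Designed', 'Managed', 'Led', 'Created',
--         'Built', 'Optimized', 'Improved', 'Increased', 'Reduced', 'Achieved',
--         'Delivered', 'Collaborated', 'Streamlined', 'Enhanced', 'Established'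
--     ]
--
--     # If text doesn't start with action verb, try to add one
--     text_lower = text.lower().strip()
--     if not any(text_lower.startswith(verb.lower()) for verb in action_verbs):
--         # Try to find a suitable action verb based on content
--         if any(word in text_lower for word in ['develop', 'code', 'program', 'software']):
--             text = "Developed " + text
--         elif any(word in text_lower for word in ['manage', 'lead', 'team']):
--             text = "Managed " + text
--         elif any(word in text_lower for word in ['design', 'create', 'build']):
--             text = "Created " + text
--
--     # Try to add quantification if numbers are mentioned
--     if any(char.isdigit() for char in text):
--         # Already has numbers, keep as is
--         pass
--     else:
--         # Could add "Significantly" or similar, but keep original for now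
--         pass
--
--     return text.strip()
-- ===== SOURCE B (Python) =====
-- _VERB_PREFIXES = ('developed', 'implemented', 'designed', 'managed', 'led', 'created',
--                   'built', 'optimized', 'improved', 'increased', 'reduced', 'achieved',
--                   'delivered', 'collaborated', 'streamlined', 'enhanced', 'established')
--
-- # Flat keyword -> (priority, verb) map; the chosen verb is the one of MINIMAL
-- # priority among all keywords occurring in the text (argmin over one pass),
-- # which equals A's first-matching-group rule.
-- _KEYWORD_PRIO = {
--     'develop': (0, 'Developed'), 'code': (0, 'Developed'),
--     'program': (0, 'Developed'), 'software': (0, 'Developed'),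
--     'manage': (1, 'Managed'), 'lead': (1, 'Managed'), 'team': (1, 'Managed'),
--     'design': (2, 'Created'), 'create': (2, 'Created'), 'build': (2, 'Created'),
-- }
--
--
-- def enhance_bullet_point(text: str) -> str:
--     t = text.lower().strip()
--     if t.startswith(_VERB_PREFIXES):
--         return text.strip()
--     best = None
--     for kw, (prio, verb) in _KEYWORD_PRIO.items():
--         if kw in t and (best is None or prio < best[0]):
--             best = (prio, verb)
--     if best is None:
--         return text.strip()
--     return (best[1] + " " + text).strip()
-- ===== Notes on version B (the rewrite author's own statement) =====
-- stated objective: alternative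
-- what changed: Replaces A's if/elif first-matching-group chain by a single argmin pass over a flat keyword->(priority, verb) map (scan every keyword, keep the minimal-priority hit), guards with one C-level startswith on a lowercase verb tuple instead of 17 generator-driven startswith calls, and drops A's per-character digit scan.
import Mathlib
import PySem

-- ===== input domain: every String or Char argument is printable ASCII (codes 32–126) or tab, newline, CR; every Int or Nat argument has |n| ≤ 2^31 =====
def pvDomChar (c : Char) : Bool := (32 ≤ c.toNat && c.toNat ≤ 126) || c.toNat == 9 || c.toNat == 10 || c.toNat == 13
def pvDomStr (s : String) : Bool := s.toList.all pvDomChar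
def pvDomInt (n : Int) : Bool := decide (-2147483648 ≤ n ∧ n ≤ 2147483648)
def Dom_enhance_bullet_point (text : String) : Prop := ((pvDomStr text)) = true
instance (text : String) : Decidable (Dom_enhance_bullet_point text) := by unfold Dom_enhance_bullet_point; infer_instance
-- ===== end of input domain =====

-- B replaces A's if/elif first-matching-group chain by a single argmin pass over a flat
-- keyword -> (priority, verb) map and drops A's no-op digit scan; objective: alternative.

-- ===== PORT A =====
def pvActionVerbs : List String :=
  ["Developed", "Implemented", "Designed", "Managed", "Led", "Created",
   "Built", "Optimized", "Improved", "Increased", "Reduced", "Achieved",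
   "Delivered", "Collaborated", "Streamlined", "Enhanced", "Established"]

def enhance_bullet_point (text : String) : String :=
  let text_lower := PySem.Str.strip (PySem.Str.lower text)
  let text1 :=
    if !(pvActionVerbs.any (fun verb => PySem.Str.startswith text_lower (PySem.Str.lower verb))) then
      if ["develop", "code", "program", "software"].any (fun w => PySem.Str.isIn w text_lower) then
        "Developed " ++ text
      else if ["manage", "lead", "team"].any (fun w => PySem.Str.isIn w text_lower) then
        "Managed " ++ text
      else if ["design", "create", "build"].any (fun w => PySem.Str.isIn w text_lower) then
        "Created " ++ text
      else text
    else text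
  -- A's digit check does nothing in either branch: ported as the identity it is
  PySem.Str.strip text1

-- ===== PORT B =====
def pvVerbPrefixes : List String :=
  ["developed", "implemented", "designed", "managed", "led", "created",
   "built", "optimized", "improved", "increased", "reduced", "achieved",
   "delivered", "collaborated", "streamlined", "enhanced", "established"]

def pvKeywordPrio : List (String × Nat × String) :=
  [("develop", 0, "Developed"), ("code", 0, "Developed"),
   ("program", 0, "Developed"), ("software", 0, "Developed"),
   ("manage", 1, "Managed"), ("lead", 1, "Managed"), ("team", 1, "Managed"),
   ("design", 2, "Created"), ("create", 2, "Created"), ("build", 2, "Created")]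


-- the loop body of Source B's argmin pass
def pvStep (t : String) (best : Option (Nat × String)) (kv : String × Nat × String) :
    Option (Nat × String) :=
  if PySem.Str.isIn kv.1 t &&
      (match best with
       | none => true
       | some b => decide (kv.2.1 < b.1)) then
    some kv.2
  else best

-- the argmin loop of Source B: keep the minimal-priority keyword hit
def pvBest (t : String) : Option (Nat × String) :=
  pvKeywordPrio.foldl (pvStep t) none

def enhance_bullet_point_alt (text : String) : String :=
  let t := PySem.Str.strip (PySem.Str.lower text)
  if pvVerbPrefixes.any (fun v => PySem.Str.startswith t v) then
    PySem.Str.strip text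
  else
    match pvBest t with
    | none => PySem.Str.strip text
    | some b => PySem.Str.strip ((b.2 ++ " ") ++ text)

-- ===== PRECONDITION & SPEC =====
def Spec_enhance_bullet_point (text : String) (out : String) : Prop := out = enhance_bullet_point_alt text
instance (text : String) (out : String) : Decidable (Spec_enhance_bullet_point text out) := by unfold Spec_enhance_bullet_point; infer_instance

-- ===== CLAIM (what is proved, stated in full; the proofs are below) =====
def Claim_equal_enhance_bullet_point : Prop := ∀ (text : String), Dom_enhance_bullet_point text → Spec_enhance_bullet_point text (enhance_bullet_point text)

-- ===== LEMMAS AND PROOFS =====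
theorem guard_eq (t : String) :
    pvActionVerbs.any (fun verb => PySem.Str.startswith t (PySem.Str.lower verb))
      = pvVerbPrefixes.any (fun v => PySem.Str.startswith t v) := by
  simp only [pvActionVerbs, pvVerbPrefixes, List.any_cons, List.any_nil]
  norm_num [show PySem.Str.lower "Developed" = "developed" from rfl,
    show PySem.Str.lower "Implemented" = "implemented" from rfl,
    show PySem.Str.lower "Designed" = "designed" from rfl,
    show PySem.Str.lower "Managed" = "managed" from rfl,
    show PySem.Str.lower "Led" = "led" from rfl,
    show PySem.Str.lower "Created" = "created" from rfl,
    show PySem.Str.lower "Built" = "built" from rfl,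
    show PySem.Str.lower "Optimized" = "optimized" from rfl,
    show PySem.Str.lower "Improved" = "improved" from rfl,
    show PySem.Str.lower "Increased" = "increased" from rfl,
    show PySem.Str.lower "Reduced" = "reduced" from rfl,
    show PySem.Str.lower "Achieved" = "achieved" from rfl,
    show PySem.Str.lower "Delivered" = "delivered" from rfl,
    show PySem.Str.lower "Collaborated" = "collaborated" from rfl,
    show PySem.Str.lower "Streamlined" = "streamlined" from rfl,
    show PySem.Str.lower "Enhanced" = "enhanced" from rfl,
    show PySem.Str.lower "Established" = "established" from rfl]

-- the if/elif chain equals the argmin-fold result, by exhausting the 10 keyword booleans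

-- the if/elif chain equals the argmin-fold result, by exhausting the 10 keyword booleans
theorem chain_eq_best (t text : String) :
    PySem.Str.strip
      (if ["develop", "code", "program", "software"].any (fun w => PySem.Str.isIn w t) then
        "Developed " ++ text
      else if ["manage", "lead", "team"].any (fun w => PySem.Str.isIn w t) then
        "Managed " ++ text
      else if ["design", "create", "build"].any (fun w => PySem.Str.isIn w t) then
        "Created " ++ text
      else text)
      = (match pvBest t with
         | none => PySem.Str.strip text
         | some b => PySem.Str.strip ((b.2 ++ " ") ++ text)) := by
  cases h1 : PySem.Chars.isIn ['d', 'e', 'v', 'e', 'l', 'o', 'p'] t.toList with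
  | true =>
    simp [pvBest, pvKeywordPrio, pvStep, List.foldl_cons, List.foldl_nil, h1]
  | false =>
    cases h2 : PySem.Chars.isIn ['c', 'o', 'd', 'e'] t.toList with
    | true =>
      simp [pvBest, pvKeywordPrio, pvStep, List.foldl_cons, List.foldl_nil, h1, h2]
    | false =>
      cases h3 : PySem.Chars.isIn ['p', 'r', 'o', 'g', 'r', 'a', 'm'] t.toList with
      | true =>
        simp [pvBest, pvKeywordPrio, pvStep, List.foldl_cons, List.foldl_nil, h1, h2, h3]
      | false =>
        cases h4 : PySem.Chars.isIn ['s', 'o', 'f', 't', 'w', 'a', 'r', 'e'] t.toList with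
        | true =>
          simp [pvBest, pvKeywordPrio, pvStep, List.foldl_cons, List.foldl_nil, h1, h2, h3, h4]
        | false =>
          cases h5 : PySem.Chars.isIn ['m', 'a', 'n', 'a', 'g', 'e'] t.toList with
          | true =>
            simp [pvBest, pvKeywordPrio, pvStep, List.foldl_cons, List.foldl_nil, h1, h2, h3, h4, h5]
          | false =>
            cases h6 : PySem.Chars.isIn ['l', 'e', 'a', 'd'] t.toList with
            | true =>
              simp [pvBest, pvKeywordPrio, pvStep, List.foldl_cons, List.foldl_nil, h1, h2, h3, h4, h5, h6]
            | false =>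
              cases h7 : PySem.Chars.isIn ['t', 'e', 'a', 'm'] t.toList with
              | true =>
                simp [pvBest, pvKeywordPrio, pvStep, List.foldl_cons, List.foldl_nil, h1, h2, h3, h4, h5, h6, h7]
              | false =>
                cases h8 : PySem.Chars.isIn ['d', 'e', 's', 'i', 'g', 'n'] t.toList with
                | true =>
                  simp [pvBest, pvKeywordPrio, pvStep, List.foldl_cons, List.foldl_nil, h1, h2, h3, h4, h5, h6, h7, h8]
                | false =>
                  cases h9 : PySem.Chars.isIn ['c', 'r', 'e', 'a', 't', 'e'] t.toList with
                  | true =>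
                    simp [pvBest, pvKeywordPrio, pvStep, List.foldl_cons, List.foldl_nil, h1, h2, h3, h4, h5, h6, h7, h8, h9]
                  | false =>
                    cases h10 : PySem.Chars.isIn ['b', 'u', 'i', 'l', 'd'] t.toList with
                    | true =>
                      simp [pvBest, pvKeywordPrio, pvStep, List.foldl_cons, List.foldl_nil, h1, h2, h3, h4, h5, h6, h7, h8, h9, h10]
                    | false =>
                      simp [pvBest, pvKeywordPrio, pvStep, List.foldl_cons, List.foldl_nil, h1, h2, h3, h4, h5, h6, h7, h8, h9, h10]

-- ===== VERDICT (by name: the statement is the Claim_ definition above) =====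
theorem enhance_bullet_point_spec : Claim_equal_enhance_bullet_point := by
  intro text _
  unfold Spec_enhance_bullet_point
  simp only [enhance_bullet_point, enhance_bullet_point_alt, guard_eq]
  cases g : (pvVerbPrefixes.any fun v =>
      PySem.Str.startswith (PySem.Str.strip (PySem.Str.lower text)) v) with
  | true => rfl
  | false =>
    rw [if_pos (show (!false) = true from rfl), if_neg (show ¬ (false = true) by simp)]
    exact chain_eq_best (PySem.Str.strip (PySem.Str.lower text)) text
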